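-- pv_equiv track=rewrite | github.com/1r0nw1ll/quantum-arithmetic-research | qa_algorithm_competency_batch5.py | qa_orbit_family
-- ===== SOURCE A (Python) =====
-- MODULUS  = 9
--
-- def qa_step(b, e, m=MODULUS): return e % m, (b + e) % m
--
-- def qa_orbit_family(b, e, m=MODULUS, max_steps=500):
--     seen, state = {}, (b % m, e % m)
--     for t in range(max_steps):
--         if state in seen:
--             p = t - seen[state]
--             if p == 1:  return "singularity"
--             if p == 8:  return "satellite"
--             if p == 24: return "cosmos"
--             return f"period_{p}"
--         seen[state] = t
--         state = qa_step(*state, m)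
--     return "unknown"
-- ===== SOURCE B (Python) =====
-- MODULUS = 9
--
-- def qa_orbit_family(b, e, m=MODULUS, max_steps=500):
--     # The pair map is invertible mod m, so the orbit is purely periodic:
--     # the first state to repeat is always the start. Walk forward from the
--     # start and return as soon as we come back to it.
--     start = (b % m, e % m)
--     x, y = start
--     for t in range(1, max_steps):
--         x, y = y % m, (x + y) % m
--         if (x, y) == start:
--             if t == 1:  return "singularity"
--             if t == 8:  return "satellite"
--             if t == 24: return "cosmos"
--             return f"period_{t}"
--     return "unknown"
-- ===== Notes on version B (the rewrite author's own statement) =====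
-- stated objective: simpler
-- what changed: B drops A's seen-dictionary entirely: since the pair map is a bijection on Z_m^2 the orbit is purely periodic, so B iterates the map forward from the reduced start and returns the period at the first return to the start, keeping only the current state instead of a map of all visited states.
import Mathlib
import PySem

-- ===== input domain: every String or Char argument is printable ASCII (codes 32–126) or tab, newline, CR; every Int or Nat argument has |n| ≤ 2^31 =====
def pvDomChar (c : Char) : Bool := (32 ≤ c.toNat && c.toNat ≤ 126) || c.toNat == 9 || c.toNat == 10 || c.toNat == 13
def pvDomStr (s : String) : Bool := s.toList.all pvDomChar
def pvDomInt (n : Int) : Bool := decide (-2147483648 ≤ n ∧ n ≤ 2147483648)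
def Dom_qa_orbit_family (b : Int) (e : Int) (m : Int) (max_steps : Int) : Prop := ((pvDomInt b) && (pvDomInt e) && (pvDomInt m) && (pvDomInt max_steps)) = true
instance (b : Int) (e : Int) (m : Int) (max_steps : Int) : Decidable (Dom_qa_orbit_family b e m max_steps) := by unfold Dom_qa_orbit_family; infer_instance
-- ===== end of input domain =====

-- B drops A's seen-dictionary: the pair map is invertible mod m, so the orbit is purely
-- periodic and the first repeated state is always the start; B just walks forward from the
-- start until it returns there (objective: simpler).

-- ===== PORT A =====
-- helper qa_step(b, e, m)
def qaStepA (b : Int) (e : Int) (m : Int) : Int × Int :=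
  (PySem.Int.mod e m, PySem.Int.mod (b + e) m)

-- the `for t in range(max_steps)` loop of A: fuel = remaining iterations, t = Python's t
-- Python's dict with O(1) lookup; only get?/insert are used, so insertion order is never observed
def qaLoopA (m : Int) : Nat → Std.HashMap (Int × Int) Int → Int × Int → Int → String
  | 0, _, _, _ => "unknown"
  | n + 1, seen, state, t =>
    match seen.get? state with
    | some t0 =>
      let p := t - t0
      if p = 1 then "singularity"
      else if p = 8 then "satellite"
      else if p = 24 then "cosmos"
      else "period_" ++ PySem.Int.toStr p
    | none => qaLoopA m n (seen.insert state t) (qaStepA state.1 state.2 m) (t + 1)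

def qa_orbit_family (b : Int) (e : Int) (m : Int) (max_steps : Int) : String :=
  qaLoopA m max_steps.toNat Std.HashMap.emptyWithCapacity (PySem.Int.mod b m, PySem.Int.mod e m) 0

-- ===== PORT B =====
-- the `for t in range(1, max_steps)` loop of B: advance the state and compare with start
def qaLoopB (m : Int) (start : Int × Int) : Nat → Int × Int → Int → String
  | 0, _, _ => "unknown"
  | n + 1, st, t =>
    let st' := (PySem.Int.mod st.2 m, PySem.Int.mod (st.1 + st.2) m)
    if st' = start then
      if t = 1 then "singularity"
      else if t = 8 then "satellite"
      else if t = 24 then "cosmos"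
      else "period_" ++ PySem.Int.toStr t
    else qaLoopB m start n st' (t + 1)

def qa_orbit_family_alt (b : Int) (e : Int) (m : Int) (max_steps : Int) : String :=
  let start := (PySem.Int.mod b m, PySem.Int.mod e m)
  qaLoopB m start (max_steps - 1).toNat start 1

-- ===== PRECONDITION & SPEC =====
-- Pre_ excludes only m = 0, on which Python's `b % m` raises ZeroDivisionError.
def Pre_qa_orbit_family (b : Int) (e : Int) (m : Int) (max_steps : Int) : Prop := m ≠ 0
instance (b : Int) (e : Int) (m : Int) (max_steps : Int) : Decidable (Pre_qa_orbit_family b e m max_steps) := by unfold Pre_qa_orbit_family; infer_instance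

def pvWitness_qa_orbit_family : Int × Int × Int × Int := (2, 1, 9, 50)

def Spec_qa_orbit_family (b : Int) (e : Int) (m : Int) (max_steps : Int) (out : String) : Prop := out = qa_orbit_family_alt b e m max_steps
instance (b : Int) (e : Int) (m : Int) (max_steps : Int) (out : String) : Decidable (Spec_qa_orbit_family b e m max_steps out) := by unfold Spec_qa_orbit_family; infer_instance

-- ===== CLAIM (what is proved, stated in full; the proofs are below) =====
def Claim_equal_qa_orbit_family : Prop := ∀ (b : Int) (e : Int) (m : Int) (max_steps : Int), Dom_qa_orbit_family b e m max_steps → Pre_qa_orbit_family b e m max_steps → Spec_qa_orbit_family b e m max_steps (qa_orbit_family b e m max_steps)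

-- ===== LEMMAS AND PROOFS =====

-- the step map, as one function on pairs (equal to both ports' inline computations)
def qaStepP (m : Int) (p : Int × Int) : Int × Int :=
  (PySem.Int.mod p.2 m, PySem.Int.mod (p.1 + p.2) m)

-- the orbit
def qaOrb (m : Int) (p0 : Int × Int) (n : Nat) : Int × Int := (qaStepP m)^[n] p0

-- canonical (already-reduced) pairs
def qaCan (m : Int) (p : Int × Int) : Prop :=
  PySem.Int.mod p.1 m = p.1 ∧ PySem.Int.mod p.2 m = p.2

lemma qaOrb_succ (m : Int) (p0 : Int × Int) (n : Nat) :
    qaOrb m p0 (n + 1) = qaStepP m (qaOrb m p0 n) := by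
  simp [qaOrb, Function.iterate_succ_apply']

lemma qaLoopB_succ (m : Int) (start : Int × Int) (n : Nat) (st : Int × Int) (t : Int) :
    qaLoopB m start (n + 1) st t =
      if qaStepP m st = start then
        if t = 1 then "singularity"
        else if t = 8 then "satellite"
        else if t = 24 then "cosmos"
        else "period_" ++ PySem.Int.toStr t
      else qaLoopB m start n (qaStepP m st) (t + 1) := rfl

lemma hmap_get?_insert (d : Std.HashMap (Int × Int) Int) (k k' : Int × Int) (v : Int) :
    (d.insert k v).get? k' = if k' = k then some v else d.get? k' := by
  simp [Std.HashMap.getElem?_insert, beq_iff_eq]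
  rcases eq_or_ne k k' with h | h <;> simp [h, eq_comm]

lemma hmap_get?_empty (k : Int × Int) :
    (Std.HashMap.emptyWithCapacity : Std.HashMap (Int × Int) Int).get? k = none := by
  simp

lemma qaCan_step (m : Int) (p : Int × Int) : qaCan m (qaStepP m p) := by
  constructor <;> simp [qaStepP, PySem.Int.mod]

lemma qaCan_orb (m : Int) (p0 : Int × Int) (h0 : qaCan m p0) (n : Nat) :
    qaCan m (qaOrb m p0 n) := by
  cases n with
  | zero => exact h0
  | succ k => rw [qaOrb_succ]; exact qaCan_step m _

lemma fmod_congr (a b m : Int) (h : a % m = b % m) : a.fmod m = b.fmod m := by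
  rw [Int.fmod_eq_emod, Int.fmod_eq_emod, h]
  have hiff : (m ∣ a) ↔ (m ∣ b) := by rw [Int.dvd_iff_emod_eq_zero, Int.dvd_iff_emod_eq_zero, h]
  by_cases h0 : 0 ≤ m ∨ m ∣ a
  · rw [if_pos h0, if_pos (by tauto)]
  · rw [if_neg h0, if_neg (by tauto)]

lemma fmod_emod (a m : Int) : (a.fmod m) % m = a % m := by
  simp [Int.fmod_eq_emod]
  split <;> simp

lemma qaStep_inj (m : Int) (p q : Int × Int) (hp : qaCan m p) (hq : qaCan m q)
    (h : qaStepP m p = qaStepP m q) : p = q := by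
  obtain ⟨hp1, hp2⟩ := hp
  obtain ⟨hq1, hq2⟩ := hq
  have h1 : PySem.Int.mod p.2 m = PySem.Int.mod q.2 m := congrArg Prod.fst h
  have h2 : PySem.Int.mod (p.1 + p.2) m = PySem.Int.mod (q.1 + q.2) m := congrArg Prod.snd h
  have he2 : p.2 = q.2 := by rw [← hp2, ← hq2]; exact h1
  have hem : (p.1 + p.2) % m = (q.1 + q.2) % m := by
    have := congrArg (· % m) h2
    simpa [PySem.Int.mod, fmod_emod] using this
  have he1 : p.1 % m = q.1 % m := by
    have h := Int.emod_eq_emod_iff_emod_sub_eq_zero.mp hem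
    have h' : (p.1 - q.1) % m = 0 := by
      have hx : p.1 + p.2 - (q.1 + q.2) = p.1 - q.1 := by rw [he2]; ring
      rwa [hx] at h
    exact Int.emod_eq_emod_iff_emod_sub_eq_zero.mpr h'
  have : p.1 = q.1 := by
    rw [← hp1, ← hq1]
    exact fmod_congr _ _ _ he1
  exact Prod.ext this he2

-- the first state repeating an earlier one, along a so-far injective orbit, is the start
lemma qa_first_repeat (m : Int) (p0 : Int × Int) (h0 : qaCan m p0) (T j : Nat)
    (hj : j < T)
    (hdist : ∀ i k : Nat, i < k → k < T → qaOrb m p0 i ≠ qaOrb m p0 k)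
    (h : qaOrb m p0 T = qaOrb m p0 j) : j = 0 := by
  by_contra hne
  have hj1 : 1 ≤ j := Nat.one_le_iff_ne_zero.mpr hne
  have hT1 : 1 ≤ T := le_trans hj1 (le_of_lt hj)
  have hstep : qaStepP m (qaOrb m p0 (T - 1)) = qaStepP m (qaOrb m p0 (j - 1)) := by
    rw [← qaOrb_succ, ← qaOrb_succ, Nat.sub_add_cancel hT1, Nat.sub_add_cancel hj1]
    exact h
  have heq : qaOrb m p0 (T - 1) = qaOrb m p0 (j - 1) :=
    qaStep_inj m _ _ (qaCan_orb m p0 h0 _) (qaCan_orb m p0 h0 _) hstep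
  exact hdist (j - 1) (T - 1) (by omega) (by omega) heq.symm

-- the main loop correspondence
lemma qaLoop_eq (m : Int) (p0 : Int × Int) (h0 : qaCan m p0) :
    ∀ (n T : Nat) (seen : Std.HashMap (Int × Int) Int),
      1 ≤ T →
      (∀ q v, seen.get? q = some v → ∃ j : Nat, j < T ∧ q = qaOrb m p0 j ∧ v = (j : Int)) →
      (∀ j : Nat, j < T → seen.get? (qaOrb m p0 j) = some (j : Int)) →
      (∀ i k : Nat, i < k → k < T → qaOrb m p0 i ≠ qaOrb m p0 k) →
      qaLoopA m n seen (qaOrb m p0 T) (T : Int) = qaLoopB m p0 n (qaOrb m p0 (T - 1)) (T : Int) := by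
  intro n
  induction n with
  | zero => intro T seen _ _ _ _; rfl
  | succ n ih =>
    intro T seen hT hsound hcomp hdist
    have hstep' : qaStepP m (qaOrb m p0 (T - 1)) = qaOrb m p0 T := by
      rw [← qaOrb_succ, Nat.sub_add_cancel hT]
    cases hlk : seen.get? (qaOrb m p0 T) with
    | some v =>
      obtain ⟨j, hjT, hqe, hve⟩ := hsound _ _ hlk
      have hj0 : j = 0 := qa_first_repeat m p0 h0 T j hjT hdist hqe
      subst hj0
      have hstart : qaOrb m p0 T = p0 := by simpa [qaOrb] using hqe
      subst hve
      -- A fires with p = T - 0 = T; B fires with t = T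
      have hfire : qaStepP m (qaOrb m p0 (T - 1)) = p0 := by rw [hstep', hstart]
      simp only [qaLoopA, hlk, qaLoopB_succ, if_pos hfire]
      norm_num
    | none =>
      have hTnotin : ∀ j : Nat, j < T → qaOrb m p0 T ≠ qaOrb m p0 j := by
        intro j hj heq
        have hc := hcomp j hj
        rw [← heq, hlk] at hc
        exact absurd hc (by simp)
      have hnstart : qaOrb m p0 T ≠ p0 := by
        have := hTnotin 0 hT
        simpa [qaOrb] using this
      have hA : qaLoopA m (n + 1) seen (qaOrb m p0 T) (T : Int)
          = qaLoopA m n (seen.insert (qaOrb m p0 T) (T : Int)) (qaStepA (qaOrb m p0 T).1 (qaOrb m p0 T).2 m) ((T : Int) + 1) := by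
        simp only [qaLoopA, hlk]
      have hB : qaLoopB m p0 (n + 1) (qaOrb m p0 (T - 1)) (T : Int)
          = qaLoopB m p0 n (qaOrb m p0 T) ((T : Int) + 1) := by
        rw [qaLoopB_succ, hstep', if_neg hnstart]
      rw [hA, hB]
      have hstepA : qaStepA (qaOrb m p0 T).1 (qaOrb m p0 T).2 m = qaOrb m p0 (T + 1) := by
        rw [qaOrb_succ]; rfl
      rw [hstepA]
      have hcast : ((T : Int) + 1) = ((T + 1 : Nat) : Int) := by push_cast; ring
      rw [hcast]
      have := ih (T + 1) (seen.insert (qaOrb m p0 T) (T : Int)) (by omega)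
        (by
          intro q v hq
          rw [hmap_get?_insert] at hq
          split at hq
          · next hqe =>
            exact ⟨T, by omega, by simpa using hqe, by simpa using hq.symm⟩
          · obtain ⟨j, hj, h1, h2⟩ := hsound q v hq
            exact ⟨j, by omega, h1, h2⟩)
        (by
          intro j hj
          rcases Nat.lt_succ_iff_lt_or_eq.mp hj with hj' | hj'
          · rw [hmap_get?_insert, if_neg (fun hc => hTnotin j hj' hc.symm), hcomp j hj']
          · subst hj'; rw [hmap_get?_insert, if_pos rfl])
        (by
          intro i k hik hk
          rcases Nat.lt_succ_iff_lt_or_eq.mp hk with hk' | hk'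
          · exact hdist i k hik hk'
          · subst hk'; exact fun hc => hTnotin i hik hc.symm)
      simpa [Nat.add_sub_cancel] using this

-- ===== VERDICT (by name: the statement is the Claim_ definition above) =====
theorem qa_orbit_family_spec : Claim_equal_qa_orbit_family := by
  intro b e m max_steps _ hm
  unfold Spec_qa_orbit_family qa_orbit_family qa_orbit_family_alt
  set p0 : Int × Int := (PySem.Int.mod b m, PySem.Int.mod e m) with hp0
  have h0 : qaCan m p0 := by
    constructor <;> simp [hp0, PySem.Int.mod]

  rcases Nat.eq_zero_or_pos max_steps.toNat with h | h
  · have h1 : (max_steps - 1).toNat = 0 := by omega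
    rw [h, h1]; rfl
  · obtain ⟨N, hN⟩ : ∃ N, max_steps.toNat = N + 1 := ⟨max_steps.toNat - 1, by omega⟩
    have h1 : (max_steps - 1).toNat = N := by omega
    rw [hN, h1]
    have hstep0 : qaStepA p0.1 p0.2 m = qaOrb m p0 1 := by rw [qaOrb_succ]; rfl
    have hfirst : qaLoopA m (N + 1) Std.HashMap.emptyWithCapacity p0 0
        = qaLoopA m N (Std.HashMap.emptyWithCapacity.insert p0 0) (qaOrb m p0 1) 1 := by
      rw [show qaLoopA m (N + 1) Std.HashMap.emptyWithCapacity p0 0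
          = qaLoopA m N (Std.HashMap.emptyWithCapacity.insert p0 (0 : Int)) (qaStepA p0.1 p0.2 m) (0 + 1) from by
        simp only [qaLoopA, hmap_get?_empty], hstep0]
      norm_num
    rw [hfirst]
    have := qaLoop_eq m p0 h0 N 1 (Std.HashMap.emptyWithCapacity.insert p0 0) (le_refl 1)
      (by
        intro q v hq
        rw [hmap_get?_insert] at hq
        split at hq
        · next hqe => exact ⟨0, by omega, by simpa [qaOrb] using hqe, by simpa using hq.symm⟩
        · rw [hmap_get?_empty] at hq; exact absurd hq (by simp))
      (by
        intro j hj
        interval_cases j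
        simp [qaOrb])
      (by intro i k hik hk; omega)
    simpa [qaOrb] using this
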